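-- pv_equiv track=rewrite | github.com/Ethyros-AI/ModelCypher | src/modelcypher/core/domain/vocabulary/cross_vocab_merger.py | _is_special_token
-- ===== SOURCE A (Python) =====
-- def _is_special_token(token: str) -> bool:
--     """Check if token is a special token."""
--     special_patterns = [
--         "<|",
--         "|>",
--         "<s>",
--         "</s>",
--         "<pad>",
--         "<unk>",
--         "[CLS]",
--         "[SEP]",
--         "[MASK]",
--         "[PAD]",
--         "[UNK]",
--         "<bos>",
--         "<eos>",
--     ]
--     token_lower = token.lower()
--     return any(p.lower() in token_lower for p in special_patterns)
-- ===== SOURCE B (Python) =====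
-- # B: first-character dispatch — every special pattern starts with '<', '|' or '[',
-- # so scan the lowered token once and, only at those trigger characters, test the
-- # small group of patterns starting with that character.
--
-- _GROUPS = {
--     "<": ("<|", "<s>", "</s>", "<pad>", "<unk>", "<bos>", "<eos>"),
--     "|": ("|>",),
--     "[": ("[cls]", "[sep]", "[mask]", "[pad]", "[unk]"),
-- }
--
--
-- def _is_special_token(token: str) -> bool:
--     t = token.lower()
--     for i, c in enumerate(t):
--         for p in _GROUPS.get(c, ()):
--             if t.startswith(p, i):
--                 return True
--     return False
-- ===== Notes on version B (the rewrite author's own statement) =====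
-- stated objective: alternative
-- what changed: Replaces A's per-pattern full substring searches with a single scan of the lowered token using a first-character dispatch table: patterns are grouped by their opening character ('<', '|', '['), and only at positions holding such a trigger character is the matching group's handful of patterns tested with startswith.
import Mathlib
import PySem

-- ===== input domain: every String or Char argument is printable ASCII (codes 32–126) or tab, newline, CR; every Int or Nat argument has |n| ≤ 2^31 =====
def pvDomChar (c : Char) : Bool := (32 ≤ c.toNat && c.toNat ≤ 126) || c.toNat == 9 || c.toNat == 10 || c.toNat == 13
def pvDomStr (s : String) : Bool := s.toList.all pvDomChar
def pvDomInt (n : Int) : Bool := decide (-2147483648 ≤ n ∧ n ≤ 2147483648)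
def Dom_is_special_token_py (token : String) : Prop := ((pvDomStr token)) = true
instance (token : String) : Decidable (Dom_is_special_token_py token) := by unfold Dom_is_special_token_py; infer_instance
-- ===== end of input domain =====

-- B replaces A's per-pattern substring searches by one scan with a first-character dispatch table (alternative decomposition, same result).

-- ===== PORT A =====
def specialPatternsA : List (List Char) :=
  ["<|".toList, "|>".toList, "<s>".toList, "</s>".toList, "<pad>".toList,
   "<unk>".toList, "[CLS]".toList, "[SEP]".toList, "[MASK]".toList,
   "[PAD]".toList, "[UNK]".toList, "<bos>".toList, "<eos>".toList]

def is_special_token_py (token : String) : Bool :=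
  let token_lower := PySem.Chars.lower token.toList
  specialPatternsA.any (fun p => PySem.Chars.isIn (PySem.Chars.lower p) token_lower)

-- ===== PORT B =====
-- pattern groups keyed by opening character, as in Source B's dispatch dict
def groupAngle : List (List Char) :=
  ["<|".toList, "<s>".toList, "</s>".toList, "<pad>".toList, "<unk>".toList,
   "<bos>".toList, "<eos>".toList]

def groupPipe : List (List Char) := ["|>".toList]

def groupBracket : List (List Char) :=
  ["[cls]".toList, "[sep]".toList, "[mask]".toList, "[pad]".toList, "[unk]".toList]

def groupFor (c : Char) : List (List Char) :=
  if c = '<' then groupAngle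
  else if c = '|' then groupPipe
  else if c = '[' then groupBracket
  else []

def scanB : List Char → Bool
  | [] => false
  | c :: rest =>
      (groupFor c).any (fun p => PySem.Chars.startswith (c :: rest) p) || scanB rest

def is_special_token_py_alt (token : String) : Bool :=
  scanB (PySem.Chars.lower token.toList)

-- ===== PRECONDITION & SPEC =====
def Spec_is_special_token_py (token : String) (out : Bool) : Prop := out = is_special_token_py_alt token
instance (token : String) (out : Bool) : Decidable (Spec_is_special_token_py token out) := by unfold Spec_is_special_token_py; infer_instance

-- ===== CLAIM (what is proved, stated in full; the proofs are below) =====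
def Claim_equal_is_special_token_py : Prop := ∀ (token : String), Dom_is_special_token_py token → Spec_is_special_token_py token (is_special_token_py token)

-- ===== LEMMAS AND PROOFS =====

-- A's lowered pattern list, written out (proved equal to the map below)
def patternsLowered : List (List Char) :=
  ["<|".toList, "|>".toList, "<s>".toList, "</s>".toList, "<pad>".toList,
   "<unk>".toList, "[cls]".toList, "[sep]".toList, "[mask]".toList,
   "[pad]".toList, "[unk]".toList, "<bos>".toList, "<eos>".toList]

theorem patternsLowered_eq : specialPatternsA.map PySem.Chars.lower = patternsLowered := by decide

theorem patternsLowered_ne_nil : ∀ p ∈ patternsLowered, p ≠ [] := by decide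

-- the dispatch step at one position finds exactly the lowered patterns starting there
theorem groupFor_step (c : Char) (rest : List Char) :
    (groupFor c).any (fun p => PySem.Chars.startswith (c :: rest) p)
      = patternsLowered.any (fun p => PySem.Chars.startswith (c :: rest) p) := by
  apply Bool.eq_iff_iff.mpr
  by_cases h1 : c = '<'
  · subst h1; simp [groupFor, groupAngle, patternsLowered,
      PySem.Chars.startswith_iff, List.cons_prefix_cons]
  · by_cases h2 : c = '|'
    · subst h2; simp [groupFor, groupPipe, patternsLowered,
        PySem.Chars.startswith_iff, List.cons_prefix_cons]
    · by_cases h3 : c = '['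
      · subst h3; simp [groupFor, groupBracket, patternsLowered,
          PySem.Chars.startswith_iff, List.cons_prefix_cons]
      · simp [groupFor, h1, h2, h3, patternsLowered,
          PySem.Chars.startswith_iff, List.cons_prefix_cons,
          Ne.symm h1, Ne.symm h2, Ne.symm h3]

-- the dispatch scan finds exactly the substring occurrences of the lowered patterns
theorem scanB_eq_any_isIn (s : List Char) :
    scanB s = patternsLowered.any (fun p => PySem.Chars.isIn p s) := by
  induction s with
  | nil =>
      simp only [scanB]
      symm
      simp only [List.any_eq_false, Bool.not_eq_true]
      intro p hpmem
      rw [PySem.Chars.isIn_eq_false_iff]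
      intro hinf
      exact patternsLowered_ne_nil p hpmem (List.eq_nil_of_infix_nil hinf)
  | cons c rest ih =>
      rw [scanB, groupFor_step, ih]
      apply Bool.eq_iff_iff.mpr
      simp only [List.any_eq_true, Bool.or_eq_true,
        PySem.Chars.isIn_iff_infix, PySem.Chars.startswith_iff, List.infix_cons_iff]
      constructor
      · rintro (⟨p, hm, h⟩ | ⟨p, hm, h⟩)
        · exact ⟨p, hm, Or.inl h⟩
        · exact ⟨p, hm, Or.inr h⟩
      · rintro ⟨p, hm, h | h⟩
        · exact Or.inl ⟨p, hm, h⟩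
        · exact Or.inr ⟨p, hm, h⟩

-- ===== VERDICT (by name: the statement is the Claim_ definition above) =====
theorem is_special_token_py_spec : Claim_equal_is_special_token_py := by
  intro token _
  unfold Spec_is_special_token_py is_special_token_py is_special_token_py_alt
  rw [scanB_eq_any_isIn, ← patternsLowered_eq, List.any_map]
  rfl
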